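-- pv_equiv track=rewrite | github.com/Ternary-Project/Compress | final.py | _compute_groups
-- ===== SOURCE A (Python) =====
-- def _compute_groups(group_values):
--     """
--     Compute contiguous group boundaries.
--
--     Returns:
--         groups:        list of unique group names (in order of first appearance)
--         group_starts:  list of start indices
--         group_lengths: list of group sizes
--     """
--     groups = []
--     group_starts = []
--     group_lengths = []
--
--     if len(group_values) == 0:
--         return groups, group_starts, group_lengths
--
--     current = group_values[0]
--     start = 0
--
--     for i in range(1, len(group_values)):
--         if group_values[i] != current:
--             groups.append(str(current))
--             group_starts.append(start)
--             group_lengths.append(i - start)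
--             current = group_values[i]
--             start = i
--
--     # Last group
--     groups.append(str(current))
--     group_starts.append(start)
--     group_lengths.append(len(group_values) - start)
--
--     return groups, group_starts, group_lengths
-- ===== SOURCE B (Python) =====
-- def _compute_groups(group_values):
--     if not group_values:
--         return [], [], []
--     n = len(group_values)
--     # staged: first list all change points (index, new value), then derive the three lists
--     changes = [(i, c) for i, (p, c) in enumerate(zip(group_values, group_values[1:]), 1)
--                if p != c]
--     starts = [0] + [i for i, _ in changes]
--     groups = [str(group_values[0])] + [str(c) for _, c in changes]
--     lengths = [e - s for s, e in zip(starts, starts[1:] + [n])]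
--     return groups, starts, lengths
-- ===== Notes on version B (the rewrite author's own statement) =====
-- stated objective: alternative
-- what changed: Replaces A's single-pass state machine (current/start accumulator with a trailing flush) by a staged construction: first collect the list of change points (index, new value) from zipped adjacent pairs, then derive groups, starts and lengths from that list by maps and a pairwise-difference zip.
import Mathlib
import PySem

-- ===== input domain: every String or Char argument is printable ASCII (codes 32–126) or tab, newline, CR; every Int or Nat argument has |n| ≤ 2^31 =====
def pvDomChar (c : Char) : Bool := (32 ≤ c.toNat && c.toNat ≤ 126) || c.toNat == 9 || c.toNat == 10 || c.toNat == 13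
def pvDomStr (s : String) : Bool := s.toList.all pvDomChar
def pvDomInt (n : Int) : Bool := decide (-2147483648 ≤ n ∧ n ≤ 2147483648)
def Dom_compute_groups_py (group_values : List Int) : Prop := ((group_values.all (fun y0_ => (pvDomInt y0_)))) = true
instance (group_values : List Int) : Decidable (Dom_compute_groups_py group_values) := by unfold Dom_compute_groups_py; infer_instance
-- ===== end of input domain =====

-- B replaces A's single-pass state machine by a staged construction (change-point list, then maps/zip); same cost.


-- ===== PORT A =====
-- A's for-loop over i in range(1, len): structural recursion over the tail,
-- carrying the loop state (groups, starts, lengths, current, start) and the index i;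
-- n is len(group_values), used by the final trailing append.
def pvALoop (n : Int) (groups : List String) (starts lengths : List Int)
    (current start i : Int) : List Int → List String × List Int × List Int
  | [] => (groups ++ [PySem.Int.toStr current], starts ++ [start], lengths ++ [n - start])
  | x :: xs =>
    if x ≠ current then
      pvALoop n (groups ++ [PySem.Int.toStr current]) (starts ++ [start])
        (lengths ++ [i - start]) x i (i + 1) xs
    else
      pvALoop n groups starts lengths current start (i + 1) xs

def compute_groups_py (group_values : List Int) : List String × List Int × List Int :=
  match group_values with
  | [] => ([], [], [])
  | v :: rest => pvALoop ((rest.length : Int) + 1) [] [] [] v 0 1 rest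

-- ===== PORT B =====
-- B: list the change points (i, c) from enumerate(zip(gv, gv[1:]), 1) filtered on p != c,
-- then derive groups/starts/lengths from that list by maps and a pairwise-difference zip.
def compute_groups_py_alt (group_values : List Int) : List String × List Int × List Int :=
  match group_values with
  | [] => ([], [], [])
  | v0 :: _ =>
    let n : Int := (group_values.length : Int)
    let changes :=
      ((PySem.List.enumerate (group_values.zip (PySem.List.slice group_values (some 1) none)) 1).filter
        (fun ic => ic.2.1 != ic.2.2)).map (fun ic => (ic.1, ic.2.2))
    let starts := 0 :: changes.map (fun ic => ic.1)
    let groups := PySem.Int.toStr v0 :: changes.map (fun ic => PySem.Int.toStr ic.2)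
    let lengths := (starts.zip (starts.tail ++ [n])).map (fun se => se.2 - se.1)
    (groups, starts, lengths)

-- ===== PRECONDITION & SPEC =====
def Spec_compute_groups_py (group_values : List Int) (out : List String × List Int × List Int) : Prop := out = compute_groups_py_alt group_values
instance (group_values : List Int) (out : List String × List Int × List Int) : Decidable (Spec_compute_groups_py group_values out) := by unfold Spec_compute_groups_py; infer_instance

-- ===== CLAIM (what is proved, stated in full; the proofs are below) =====
def Claim_equal_compute_groups_py : Prop := ∀ (group_values : List Int), Dom_compute_groups_py group_values → Spec_compute_groups_py group_values (compute_groups_py group_values)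

-- ===== LEMMAS AND PROOFS =====

-- proof-side characterisation of B's change-point list
def pvChg (current i : Int) : List Int → List (Int × Int)
  | [] => []
  | x :: xs => if x ≠ current then (i, x) :: pvChg x (i + 1) xs else pvChg current (i + 1) xs

-- proof-side pairwise differences ending at n
def pvLens (s : Int) (n : Int) : List (Int × Int) → List Int
  | [] => [n - s]
  | (i, _) :: t => (i - s) :: pvLens i n t

theorem pvChg_eq (xs : List Int) : ∀ (cur i : Int),
    ((PySem.List.enumerate ((cur :: xs).zip xs) i).filter
      (fun ic => ic.2.1 != ic.2.2)).map (fun ic => (ic.1, ic.2.2)) = pvChg cur i xs := by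
  induction xs with
  | nil => intro cur i; simp [pvChg]
  | cons x xs ih =>
    intro cur i
    by_cases h : x = cur
    · subst h
      simp only [List.zip_cons_cons, PySem.List.enumerate_cons, List.filter_cons, pvChg]
      simp [ih x (i + 1)]
    · simp only [List.zip_cons_cons, PySem.List.enumerate_cons, List.filter_cons, pvChg]
      have hb : ((cur != x) : Bool) = true := by simp [bne]; exact fun e => h e.symm
      simp only [hb, if_pos (by exact fun e => h e : x ≠ cur)]
      simp [ih x (i + 1)]

theorem pvLens_eq (C : List (Int × Int)) : ∀ (s n : Int),
    (((s :: C.map (fun ic => ic.1)).zip ((C.map (fun ic => ic.1)) ++ [n])).map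
      (fun se => se.2 - se.1)) = pvLens s n C := by
  induction C with
  | nil => intro s n; simp [pvLens]
  | cons p t ih =>
    intro s n
    obtain ⟨i, c⟩ := p
    simp only [List.map_cons, List.cons_append, List.zip_cons_cons, pvLens]
    simpa using ih i n

-- loop invariant for A's loop: it emits the current run followed by the change-point groups
theorem pvALoop_eq (xs : List Int) : ∀ (n cur start i : Int) (G : List String) (S Ls : List Int),
    pvALoop n G S Ls cur start i xs =
      (G ++ PySem.Int.toStr cur :: (pvChg cur i xs).map (fun p => PySem.Int.toStr p.2),
       S ++ start :: (pvChg cur i xs).map (fun p => p.1),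
       Ls ++ pvLens start n (pvChg cur i xs)) := by
  induction xs with
  | nil => intro n cur start i G S Ls; simp [pvALoop, pvChg, pvLens]
  | cons x xs ih =>
    intro n cur start i G S Ls
    by_cases h : x = cur
    · subst h
      simp only [pvALoop, ne_eq, not_true_eq_false, if_false, pvChg]
      exact ih n x start (i + 1) G S Ls
    · simp only [pvALoop, ne_eq, if_pos h, pvChg]
      rw [ih n x i (i + 1) (G ++ [PySem.Int.toStr cur]) (S ++ [start]) (Ls ++ [i - start])]
      simp [pvLens, List.append_assoc]

-- ===== VERDICT (by name: the statement is the Claim_ definition above) =====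
theorem compute_groups_py_spec : Claim_equal_compute_groups_py := by
  intro gv _
  show compute_groups_py gv = compute_groups_py_alt gv
  cases gv with
  | nil => rfl
  | cons v rest =>
    show pvALoop ((rest.length : Int) + 1) [] [] [] v 0 1 rest = _
    rw [pvALoop_eq rest ((rest.length : Int) + 1) v 0 1 [] [] []]
    simp only [compute_groups_py_alt, PySem.List.slice_from_one, List.tail_cons]
    rw [pvChg_eq rest v 1, pvLens_eq (pvChg v 1 rest) 0 ((v :: rest).length : Int)]
    simp only [List.nil_append, List.length_cons]
    push_cast
    ring_nf
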